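-- pv_equiv track=rewrite | github.com/kelvinhuang0327/number-pattern-research | tools/evaluate_115000011.py | method_markov_w30
-- ===== SOURCE A (Python) =====
-- from collections import Counter, defaultdict
--
-- def method_markov_w30(history):
--     """Markov chain: Numbers most likely to follow previous draw's numbers."""
--     recent = history[-30:]
--
--     # Build transition matrix
--     transitions = Counter()
--     for i in range(len(recent) - 1):
--         prev = set(recent[i]['numbers'])
--         curr = recent[i + 1]['numbers']
--         for p in prev:
--             for c in curr:
--                 transitions[(p, c)] += 1
--
--     # Score based on last draw
--     last = recent[-1]['numbers']
--     scores = Counter()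
--     for num in last:
--         for (p, c), count in transitions.items():
--             if p == num:
--                 scores[c] += count
--
--     result = [n for n, _ in scores.most_common(6)]
--
--     # Fill if < 6
--     if len(result) < 6:
--         freq = Counter()
--         for d in recent:
--             freq.update(d['numbers'])
--         for n, _ in freq.most_common():
--             if n not in result and len(result) < 6:
--                 result.append(n)
--
--     return [sorted(result[:6])], None, "Markov transition probabilities from last draw (W30)"
-- ===== SOURCE B (Python) =====
-- from collections import Counter
--
-- def method_markov_w30(history):
--     """Markov chain: Numbers most likely to follow previous draw's numbers."""
--     recent = history[-30:]
--
--     # No pairwise transition matrix: summarize each consecutive step once as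
--     # (predecessor set, successor multiplicity counter), then score by membership.
--     steps = [(set(a['numbers']), Counter(b['numbers']))
--              for a, b in zip(recent, recent[1:])]
--
--     scores = Counter()
--     for num in recent[-1]['numbers']:
--         for prevs, succ in steps:
--             if num in prevs:
--                 scores.update(succ)
--
--     result = [n for n, _ in scores.most_common(6)]
--
--     if len(result) < 6:
--         freq = Counter(n for d in recent for n in d['numbers'])
--         fill = [n for n, _ in freq.most_common() if n not in result]
--         result += fill[:6 - len(result)]
--
--     return [sorted(result[:6])], None, "Markov transition probabilities from last draw (W30)"
-- ===== Notes on version B (the rewrite author's own statement) =====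
-- stated objective: alternative
-- what changed: B never builds A's pairwise transition matrix: it summarizes each consecutive step once as (predecessor set, successor Counter) and scores the last draw by set membership over these per-step summaries, and the freq fallback is a single Counter over a flattened generator with a filter+slice instead of A's guarded append loop.
import Mathlib
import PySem

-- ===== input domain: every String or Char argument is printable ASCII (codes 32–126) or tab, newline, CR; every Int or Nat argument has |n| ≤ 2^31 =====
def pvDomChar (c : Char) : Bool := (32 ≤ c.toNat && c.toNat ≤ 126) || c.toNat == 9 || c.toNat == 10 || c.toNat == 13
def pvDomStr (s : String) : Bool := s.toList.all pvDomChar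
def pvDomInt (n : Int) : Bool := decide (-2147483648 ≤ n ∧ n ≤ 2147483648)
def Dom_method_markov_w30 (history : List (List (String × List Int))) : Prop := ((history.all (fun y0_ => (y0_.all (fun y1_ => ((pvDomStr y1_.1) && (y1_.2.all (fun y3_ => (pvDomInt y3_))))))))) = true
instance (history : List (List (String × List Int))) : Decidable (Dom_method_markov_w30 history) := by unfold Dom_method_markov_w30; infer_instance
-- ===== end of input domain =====

-- B removes A's pairwise transition matrix: each consecutive step is summarized once as
-- (predecessor set, successor counter) and the last draw is scored by membership; return-value
-- equivalence proved on Pre_ (non-empty history whose last 30 draws all carry the key "numbers").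

-- ===== PORT A =====
-- shared helper: d['numbers'] (KeyError excluded by Pre_; modelled as [])
def pvNums (d : List (String × List Int)) : List Int :=
  (PySem.Dict.mk d).getD "numbers" []

def method_markov_w30 (history : List (List (String × List Int))) : List (List Int) × Option Int × String :=
  let recent := PySem.List.slice history (some (-30)) none
  let transitions : PySem.Dict (Int × Int) Int :=
    (PySem.List.pyRange 0 ((recent.length : Int) - 1) 1).foldl
      (fun t i =>
        let prev := PySem.Set.ofList (pvNums (PySem.List.pyGetD recent i []))
        let curr := pvNums (PySem.List.pyGetD recent (i + 1) [])
        prev.foldl (fun t p => curr.foldl (fun t c => t.modify (p, c) 0 (· + 1)) t) t)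
      PySem.Dict.empty
  let last := pvNums (PySem.List.pyGetD recent (-1) [])
  let scores : PySem.Dict Int Int :=
    last.foldl (fun s num =>
        transitions.items.foldl (fun s pc =>
          if pc.1.1 == num then s.modify pc.1.2 0 (· + pc.2) else s) s)
      PySem.Dict.empty
  let result := ((PySem.List.sorted scores.items (fun p => p.2) true).take 6).map (fun p => p.1)
  let result := if result.length < 6 then
      let freq : PySem.Dict Int Int :=
        recent.foldl (fun f d => (pvNums d).foldl (fun f n => f.modify n 0 (· + 1)) f) PySem.Dict.empty
      (PySem.List.sorted freq.items (fun p => p.2) true).foldl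
        (fun r p => if !(r.contains p.1) && decide (r.length < 6) then r ++ [p.1] else r) result
    else result
  ([PySem.List.sorted (result.take 6) (fun x => x) false], none,
   "Markov transition probabilities from last draw (W30)")

-- ===== PORT B =====
def method_markov_w30_alt (history : List (List (String × List Int))) : List (List Int) × Option Int × String :=
  let recent := PySem.List.slice history (some (-30)) none
  let steps := (recent.zip (PySem.List.slice recent (some 1) none)).map
      (fun ab => (PySem.Set.ofList (pvNums ab.1), PySem.Dict.counter (pvNums ab.2)))
  let scores : PySem.Dict Int Int :=
    (pvNums (PySem.List.pyGetD recent (-1) [])).foldl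
      (fun s num => steps.foldl (fun s st =>
          if PySem.Set.contains st.1 num then
            st.2.items.foldl (fun s cv => s.modify cv.1 0 (· + cv.2)) s
          else s) s)
      PySem.Dict.empty
  let result := ((PySem.List.sorted scores.items (fun p => p.2) true).take 6).map (fun p => p.1)
  let result := if result.length < 6 then
      let freq : PySem.Dict Int Int := PySem.Dict.counter (recent.flatMap pvNums)
      let fill := ((PySem.List.sorted freq.items (fun p => p.2) true).map (fun p => p.1)).filter
          (fun n => !(result.contains n))
      result ++ fill.take (6 - result.length)
    else result
  ([PySem.List.sorted (result.take 6) (fun x => x) false], none,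
   "Markov transition probabilities from last draw (W30)")

-- ===== PRECONDITION & SPEC =====
-- Pre_ excludes exactly the inputs where the Python A raises: an empty history (IndexError on
-- recent[-1]) and a draw among the last 30 without the key 'numbers' (KeyError).
def Pre_method_markov_w30 (history : List (List (String × List Int))) : Prop :=
  history ≠ [] ∧ ∀ d ∈ PySem.List.slice history (some (-30)) none, (PySem.Dict.mk d).contains "numbers" = true
instance (history : List (List (String × List Int))) : Decidable (Pre_method_markov_w30 history) := by
  unfold Pre_method_markov_w30; infer_instance

def pvWitness_method_markov_w30 : (List (List (String × List Int))) :=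
  [[("numbers", [1, 2, 3])], [("numbers", [2, 3])]]

def Spec_method_markov_w30 (history : List (List (String × List Int))) (out : List (List Int) × Option Int × String) : Prop := out = method_markov_w30_alt history
instance (history : List (List (String × List Int))) (out : List (List Int) × Option Int × String) : Decidable (Spec_method_markov_w30 history out) := by unfold Spec_method_markov_w30; infer_instance

-- ===== CLAIM (what is proved, stated in full; the proofs are below) =====
def Claim_equal_method_markov_w30 : Prop := ∀ (history : List (List (String × List Int))), Dom_method_markov_w30 history → Pre_method_markov_w30 history → Spec_method_markov_w30 history (method_markov_w30 history)

-- ===== LEMMAS AND PROOFS =====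

-- weighted counter update: fold of `s[k] = s.get(k,0) + v` over a list of (key, weight) pairs
def addW {κ : Type} [BEq κ] (s : PySem.Dict κ Int) (L : List (κ × Int)) : PySem.Dict κ Int :=
  L.foldl (fun s cv => s.modify cv.1 0 (· + cv.2)) s

-- per-step chunk of A's transition-matrix build, as a (key, weight) list
def chunkA (ab : List (String × List Int) × List (String × List Int)) : List ((Int × Int) × Int) :=
  (PySem.Set.ofList (pvNums ab.1)).flatMap (fun p => (pvNums ab.2).map (fun c => ((p, c), 1)))

theorem addW_append {κ : Type} [BEq κ] (s : PySem.Dict κ Int) (L1 L2 : List (κ × Int)) :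
    addW s (L1 ++ L2) = addW (addW s L1) L2 := List.foldl_append

theorem foldl_addW_flatMap {κ α : Type} [BEq κ] (l : List α) (g : α → List (κ × Int))
    (s : PySem.Dict κ Int) :
    l.foldl (fun s x => addW s (g x)) s = addW s (l.flatMap g) := by
  induction l generalizing s with
  | nil => rfl
  | cons x t ih => simp only [List.foldl_cons, List.flatMap_cons, addW_append, ih]

theorem keys_addW {κ : Type} [BEq κ] [LawfulBEq κ] (s : PySem.Dict κ Int) (L : List (κ × Int)) :
    (addW s L).keys = PySem.Set.update s.keys (L.map (·.1)) :=
  PySem.Dict.keys_foldl_modify_key L (·.1) 0 (fun _ cv => (· + cv.2)) s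

theorem nodup_keys_addW {κ : Type} [BEq κ] [LawfulBEq κ] (s : PySem.Dict κ Int)
    (L : List (κ × Int)) (hs : s.keys.Nodup) : (addW s L).keys.Nodup :=
  PySem.Dict.nodup_keys_foldl_modify_key L (·.1) 0 (fun _ cv => (· + cv.2)) s hs

theorem getD_addW {κ : Type} [BEq κ] [LawfulBEq κ] [DecidableEq κ]
    (s : PySem.Dict κ Int) (L : List (κ × Int)) (k : κ) :
    (addW s L).getD k 0 = s.getD k 0 + ((L.filter (fun cv => cv.1 == k)).map (·.2)).sum := by
  induction L generalizing s with
  | nil => simp [addW]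
  | cons cv t ih =>
      simp only [addW, List.foldl_cons] at *
      rw [ih, PySem.Dict.getD_modify, List.filter_cons]
      by_cases h : cv.1 = k
      · simp [h]; ring
      · have h2 : ¬ (k = cv.1) := fun hk => h hk.symm
        simp [h, h2]

theorem dict_ext_keys_getD {κ : Type} [BEq κ] [LawfulBEq κ] (d e : PySem.Dict κ Int)
    (hd : d.keys.Nodup) (he : e.keys.Nodup) (hk : d.keys = e.keys)
    (hg : ∀ k, d.getD k 0 = e.getD k 0) : d = e := by
  apply PySem.Dict.ext
  rw [PySem.Dict.items_eq_map_keys d hd 0, PySem.Dict.items_eq_map_keys e he 0, hk]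
  exact List.map_congr_left (fun k _ => by rw [hg k])

theorem set_update_ofList {α : Type} [BEq α] [LawfulBEq α] (s : PySem.Set α) (xs : List α) :
    PySem.Set.update s (PySem.Set.ofList xs) = PySem.Set.update s xs := by
  rw [PySem.Set.update_eq_append_filter, PySem.Set.update_eq_append_filter,
    PySem.Set.ofList_ofList]

theorem set_update_congr_flatMap {α β : Type} [BEq β] [LawfulBEq β] (l : List α)
    (f g : α → List β) (h : ∀ x ∈ l, PySem.Set.ofList (f x) = PySem.Set.ofList (g x)) :
    ∀ s : PySem.Set β, PySem.Set.update s (l.flatMap f) = PySem.Set.update s (l.flatMap g) := by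
  induction l with
  | nil => intro s; rfl
  | cons x t ih =>
      intro s
      rw [List.flatMap_cons, List.flatMap_cons, PySem.Set.update_append, PySem.Set.update_append,
        ← set_update_ofList s (f x), h x (by simp), set_update_ofList]
      exact ih (fun y hy => h y (by simp [hy])) _

theorem set_ofList_congr_flatMap {α β : Type} [BEq β] [LawfulBEq β] (l : List α)
    (f g : α → List β) (h : ∀ x ∈ l, PySem.Set.ofList (f x) = PySem.Set.ofList (g x)) :
    PySem.Set.ofList (l.flatMap f) = PySem.Set.ofList (l.flatMap g) := by
  rw [← PySem.Set.update_nil_left, ← PySem.Set.update_nil_left (xs := l.flatMap g)]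
  exact set_update_congr_flatMap l f g h []

theorem sum_flatMap_int {α : Type} (l : List α) (f : α → List Int) :
    (l.flatMap f).sum = (l.map (fun x => (f x).sum)).sum := by
  induction l with
  | nil => rfl
  | cons x t ih => simp [List.flatMap_cons, ih]

theorem sum_filter_eq_sum_ite {α : Type} (l : List α) (p : α → Bool) (f : α → Int) :
    ((l.filter p).map f).sum = (l.map (fun x => if p x then f x else 0)).sum := by
  induction l with
  | nil => rfl
  | cons x t ih =>
      rw [List.filter_cons]
      by_cases h : p x <;> simp [h, ih]

theorem sum_at_key (K' : List Int) (f : Int → Int) (hK : K'.Nodup) (c : Int) :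
    (((K'.map (fun k => (k, f k))).filter (fun q => q.1 == c)).map (·.2)).sum
      = if c ∈ K' then f c else 0 := by
  induction K' with
  | nil => simp
  | cons k t ih =>
      simp only [List.map_cons, List.filter_cons]
      by_cases h : k = c
      · subst h
        have hnot : k ∉ t := (List.nodup_cons.mp hK).1
        have : ((t.map (fun k => (k, f k))).filter (fun q => q.1 == k)) = [] := by
          rw [List.filter_eq_nil_iff]
          intro q hq
          rcases List.mem_map.mp hq with ⟨y, hy, rfl⟩
          simp only [beq_iff_eq]
          exact fun hyk => hnot (hyk ▸ hy)
        simp [this]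
      · have h2 : ((k : Int) == c) = false := by simp [h]
        simp only [h2, Bool.false_eq_true, if_false]
        rw [ih (List.nodup_cons.mp hK).2]
        have hck : ¬ (c = k) := fun hck => h hck.symm
        simp [List.mem_cons, hck]

-- `r += [n]` fill loop with the `n not in result and len(result) < 6` guard
theorem fill_full (F : List (Int × Int)) (R : List Int) (hR : ¬ R.length < 6) :
    F.foldl (fun r p => if !(r.contains p.1) && decide (r.length < 6) then r ++ [p.1] else r) R = R := by
  induction F generalizing R with
  | nil => rfl
  | cons p t ih => simp only [List.foldl_cons, hR, decide_false, Bool.and_false]; exact ih R hR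

theorem fill_eq (F : List (Int × Int)) (R : List Int) (hF : (F.map (fun p => p.1)).Nodup) :
    F.foldl (fun r p => if !(r.contains p.1) && decide (r.length < 6) then r ++ [p.1] else r) R
      = R ++ ((F.map (fun p => p.1)).filter (fun n => !(R.contains n))).take (6 - R.length) := by
  induction F generalizing R with
  | nil => simp
  | cons p t ih =>
      simp only [List.map_cons] at hF ⊢
      have hF' := (List.nodup_cons.mp hF).2
      have hp1 := (List.nodup_cons.mp hF).1
      rw [List.foldl_cons, List.filter_cons]
      by_cases hmem : R.contains p.1 = true
      · have hc : (!(R.contains p.1) && decide (R.length < 6)) = false := by rw [hmem]; rfl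
        have hf : (!(R.contains p.1)) = false := by rw [hmem]; rfl
        rw [hc, if_neg Bool.false_ne_true, hf, if_neg Bool.false_ne_true]
        exact ih R hF'
      · have hmb : R.contains p.1 = false := by
          cases hcb : R.contains p.1 with
          | true => exact absurd hcb hmem
          | false => rfl
        have hf : (!(R.contains p.1)) = true := by rw [hmb]; rfl
        by_cases hlen : R.length < 6
        · have hc : (!(R.contains p.1) && decide (R.length < 6)) = true := by
            rw [hmb, decide_eq_true hlen]; rfl
          rw [hc, if_pos rfl, hf, if_pos rfl]
          rw [ih (R ++ [p.1]) hF']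
          have hfc : (t.map (fun p => p.1)).filter (fun n => !((R ++ [p.1]).contains n))
              = (t.map (fun p => p.1)).filter (fun n => !(R.contains n)) := by
            apply List.filter_congr
            intro n hn
            have hne : n ≠ p.1 := fun h => hp1 (h ▸ hn)
            simp [hne]
          rw [hfc]
          have hlen' : 6 - R.length = (6 - (R ++ [p.1]).length) + 1 := by
            simp only [List.length_append, List.length_cons, List.length_nil]
            omega
          rw [hlen', List.take_succ_cons, List.append_assoc]
          rfl
        · have hc : (!(R.contains p.1) && decide (R.length < 6)) = false := by
            rw [hmb, decide_eq_false hlen]; rfl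
          rw [hc, if_neg Bool.false_ne_true, fill_full t R hlen]
          have h6 : 6 - R.length = 0 := by omega
          rw [h6, List.take_zero, List.append_nil]

-- adjacent-pairs index loop `for i in range(len(xs)-1): … xs[i] … xs[i+1] …` is a fold over zip
theorem zip_adj_aux {α β : Type} (xs : List α) (dflt : α) (g : β → α → α → β) :
    ∀ (n k : Nat) (init : β), xs.length - k = n → k ≤ xs.length →
    (PySem.List.pyRange (k : Int) ((xs.length : Int) - 1) 1).foldl
        (fun t i => g t (PySem.List.pyGetD xs i dflt) (PySem.List.pyGetD xs (i + 1) dflt)) init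
      = ((xs.drop k).zip (xs.drop (k + 1))).foldl (fun t ab => g t ab.1 ab.2) init := by
  intro n
  induction n with
  | zero =>
      intro k init hn hk
      have hk' : k = xs.length := by omega
      subst hk'
      rw [PySem.List.pyRange_one_eq_nil (by omega), List.drop_length]
      simp
  | succ n ih =>
      intro k init hn hk
      have hklt : k < xs.length := by omega
      by_cases hlast : k + 1 = xs.length
      · rw [PySem.List.pyRange_one_eq_nil (by omega)]
        rw [List.drop_eq_getElem_cons hklt]
        have : xs.drop (k + 1) = [] := by rw [hlast, List.drop_length]
        rw [this]
        simp
      · have hk1 : k + 1 < xs.length := by omega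
        rw [PySem.List.pyRange_one_cons (by omega), List.foldl_cons]
        have e1 : PySem.List.pyGetD xs (k : Int) dflt = xs[k] := by
          rw [PySem.List.pyGetD_natCast]
          exact List.getD_eq_getElem xs dflt hklt
        have e2 : PySem.List.pyGetD xs ((k : Int) + 1) dflt = xs[k + 1] := by
          rw [show ((k : Int) + 1) = ((k + 1 : Nat) : Int) by omega, PySem.List.pyGetD_natCast]
          exact List.getD_eq_getElem xs dflt hk1
        rw [e1, e2]
        have hz : (xs.drop k).zip (xs.drop (k + 1))
            = (xs[k], xs[k + 1]) :: ((xs.drop (k + 1)).zip (xs.drop (k + 2))) := by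
          rw [List.drop_eq_getElem_cons hklt, List.drop_eq_getElem_cons hk1]
          rw [List.zip_cons_cons, ← List.drop_eq_getElem_cons hk1]
        rw [hz, List.foldl_cons]
        have := ih (k + 1) (g init xs[k] xs[k + 1]) (by omega) (by omega)
        rw [show ((k : Int) + 1) = ((k + 1 : Nat) : Int) by omega]
        exact this

theorem zip_adj_foldl {α β : Type} (xs : List α) (dflt : α) (g : β → α → α → β) (init : β) :
    (PySem.List.pyRange 0 ((xs.length : Int) - 1) 1).foldl
        (fun t i => g t (PySem.List.pyGetD xs i dflt) (PySem.List.pyGetD xs (i + 1) dflt)) init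
      = (xs.zip xs.tail).foldl (fun t ab => g t ab.1 ab.2) init := by
  have := zip_adj_aux xs dflt g xs.length 0 init (by omega) (by omega)
  simpa [List.drop_one] using this

-- A's transition matrix as a single weighted-counter update from the empty dict
theorem TA_eq (R : List (List (String × List Int))) :
    (PySem.List.pyRange 0 ((R.length : Int) - 1) 1).foldl
        (fun t i =>
          (PySem.Set.ofList (pvNums (PySem.List.pyGetD R i []))).foldl
            (fun t p => (pvNums (PySem.List.pyGetD R (i + 1) [])).foldl
              (fun t c => t.modify (p, c) 0 (· + 1)) t) t)
        PySem.Dict.empty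
      = addW PySem.Dict.empty ((R.zip R.tail).flatMap chunkA) := by
  have hz := zip_adj_foldl (β := PySem.Dict (Int × Int) Int) R []
    (fun t a b =>
      (PySem.Set.ofList (pvNums a)).foldl
        (fun t p => (pvNums b).foldl (fun t c => t.modify (p, c) 0 (· + 1)) t) t)
    PySem.Dict.empty
  simp only [] at hz
  rw [hz, ← foldl_addW_flatMap]
  have hfun : (fun (t : PySem.Dict (Int × Int) Int)
        (ab : List (String × List Int) × List (String × List Int)) =>
      (PySem.Set.ofList (pvNums ab.1)).foldl
        (fun t p => (pvNums ab.2).foldl (fun t c => t.modify (p, c) 0 (· + 1)) t) t)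
      = (fun t ab => addW t (chunkA ab)) := by
    funext t ab
    show _ = addW t (chunkA ab)
    simp only [chunkA]
    rw [← foldl_addW_flatMap]
    apply PySem.List.foldl_congr_mem
    intro acc p _
    simp only [addW]
    rw [List.foldl_map]
  rw [hfun]

def TT (pairs : List (List (String × List Int) × List (String × List Int))) :
    PySem.Dict (Int × Int) Int :=
  addW PySem.Dict.empty (pairs.flatMap chunkA)

def KnS (pairs : List (List (String × List Int) × List (String × List Int))) (num : Int) :
    List Int :=
  PySem.Set.ofList ((((pairs.flatMap chunkA).map (fun q => q.1)).filter
      (fun k => k.1 == num)).map (fun k => k.2))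

-- the two per-number score-update lists: A's (filtered transition items) and B's (per-step counters)
def LAn (num : Int) (pairs : List (List (String × List Int) × List (String × List Int))) :
    List (Int × Int) :=
  ((TT pairs).items.filter (fun pc => pc.1.1 == num)).map (fun pc => (pc.1.2, pc.2))

def LBn (num : Int) (pairs : List (List (String × List Int) × List (String × List Int))) :
    List (Int × Int) :=
  (pairs.filter (fun ab => PySem.Set.contains (PySem.Set.ofList (pvNums ab.1)) num)).flatMap
    (fun ab => (PySem.Dict.counter (pvNums ab.2)).items)

theorem flatMap_filter_ite {α β : Type} (l : List α) (p : α → Bool) (g : α → List β) :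
    (l.filter p).flatMap g = l.flatMap (fun x => if p x then g x else []) := by
  induction l with
  | nil => rfl
  | cons x t ih =>
      rw [List.filter_cons]
      by_cases h : p x <;> simp [h, ih]

theorem filter_const_list {α : Type} (C : List α) (b : Bool) :
    C.filter (fun _ => b) = if b then C else [] := by
  cases b <;> simp

theorem flatMap_ite_eq_single {α : Type} (P : List Int) (hP : P.Nodup) (C : List α) (num : Int) :
    P.flatMap (fun p => if p == num then C else []) = if num ∈ P then C else [] := by
  induction P with
  | nil => simp
  | cons p t ih =>
      rw [List.flatMap_cons, ih (List.nodup_cons.mp hP).2]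
      by_cases h : p = num
      · subst h
        have hnot : p ∉ t := (List.nodup_cons.mp hP).1
        simp [hnot]
      · have h2 : ¬ (num = p) := fun hh => h hh.symm
        simp [h, h2]

theorem sum_ite_single (P : List Int) (hP : P.Nodup) (num : Int) (v : Int) :
    (P.map (fun p => if p = num then v else 0)).sum = if num ∈ P then v else 0 := by
  induction P with
  | nil => simp
  | cons p t ih =>
      rw [List.map_cons, List.sum_cons, ih (List.nodup_cons.mp hP).2]
      by_cases h : p = num
      · subst h
        have hnot : p ∉ t := (List.nodup_cons.mp hP).1
        simp [hnot]
      · have h2 : ¬ (num = p) := fun hh => h hh.symm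
        simp [h, h2]

-- ordered dedup commutes with restricting pairs to a fixed first component and projecting
theorem ofList_filter_fst_map_snd (L : List (Int × Int)) (num : Int) :
    ((PySem.Set.ofList L).filter (fun q => q.1 == num)).map (fun q => q.2)
      = PySem.Set.ofList ((L.filter (fun q => q.1 == num)).map (fun q => q.2)) := by
  induction L using List.reverseRecOn with
  | nil => rfl
  | append_singleton L q ih =>
      rw [PySem.Set.ofList_append_singleton, List.filter_append, List.filter_cons,
        List.filter_nil]
      by_cases hq1 : (q.1 == num) = true
      · rw [if_pos hq1, List.map_append, List.map_cons, List.map_nil,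
          PySem.Set.ofList_append_singleton]
        by_cases hqm : q ∈ PySem.Set.ofList L
        · rw [PySem.Set.add_of_mem hqm]
          have hmem2 : q.2 ∈ PySem.Set.ofList ((L.filter (fun q => q.1 == num)).map (fun q => q.2)) := by
            rw [← ih]
            exact List.mem_map.mpr ⟨q, List.mem_filter.mpr ⟨hqm, hq1⟩, rfl⟩
          rw [PySem.Set.add_of_mem hmem2]
          exact ih
        · rw [PySem.Set.add_of_not_mem hqm, List.filter_append, List.filter_cons, if_pos hq1,
            List.filter_nil, List.map_append, List.map_cons, List.map_nil]
          have hnot2 : q.2 ∉ PySem.Set.ofList ((L.filter (fun q => q.1 == num)).map (fun q => q.2)) := by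
            rw [← ih]
            intro hmem
            rcases List.mem_map.mp hmem with ⟨k, hkf, hk2⟩
            rcases List.mem_filter.mp hkf with ⟨hkL, hk1⟩
            have hkq : k = q := Prod.ext (by rw [eq_of_beq hk1, eq_of_beq hq1]) hk2
            exact hqm (hkq ▸ hkL)
          rw [PySem.Set.add_of_not_mem hnot2, ih]
      · have hq1' : (q.1 == num) = false := by
          cases h : (q.1 == num) with
          | true => exact absurd h hq1
          | false => rfl
        rw [if_neg hq1, List.append_nil]
        rw [PySem.Set.add_eq_ite]
        by_cases hqm : q ∈ PySem.Set.ofList L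
        · rw [if_pos hqm]; exact ih
        · rw [if_neg hqm, List.filter_append, List.filter_cons, if_neg hq1, List.filter_nil,
            List.append_nil]
          exact ih

theorem chunk_keys (ab : List (String × List Int) × List (String × List Int)) (num : Int) :
    (((chunkA ab).map (fun q => q.1)).filter (fun k => k.1 == num)).map (fun k => k.2)
      = if PySem.Set.contains (PySem.Set.ofList (pvNums ab.1)) num then pvNums ab.2 else [] := by
  simp only [chunkA]
  rw [List.map_flatMap, List.filter_flatMap, List.map_flatMap]
  have hfun : (fun (p : Int) =>
        ((((pvNums ab.2).map (fun c => ((p, c), (1 : Int)))).map (fun q => q.1)).filter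
            (fun k => k.1 == num)).map (fun k => k.2))
      = (fun p => if p == num then pvNums ab.2 else []) := by
    funext p
    rw [List.map_map,
      show ((fun (q : (Int × Int) × Int) => q.1) ∘ (fun c => ((p, c), (1 : Int)))) = (fun c : Int => (p, c)) from rfl,
      List.filter_map,
      show ((fun (k : Int × Int) => k.1 == num) ∘ (fun c : Int => (p, c))) = (fun _ : Int => p == num) from rfl,
      filter_const_list]
    by_cases h : (p == num) = true
    · rw [if_pos h, List.map_map,
        show ((fun (k : Int × Int) => k.2) ∘ (fun c : Int => (p, c))) = (fun c : Int => c) from rfl]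
      exact List.map_id' _
    · rw [if_neg h]
      simp
  rw [hfun, flatMap_ite_eq_single _ (PySem.Set.nodup_ofList _)]
  by_cases hm : num ∈ PySem.Set.ofList (pvNums ab.1)
  · rw [if_pos hm, if_pos ((PySem.Set.contains_iff _ _).mpr hm)]
  · rw [if_neg hm, if_neg (fun hc => hm ((PySem.Set.contains_iff _ _).mp hc))]

theorem chunk_sum (ab : List (String × List Int) × List (String × List Int)) (num c : Int) :
    (((chunkA ab).filter (fun cv => cv.1 == (num, c))).map (fun cv => cv.2)).sum
      = if PySem.Set.contains (PySem.Set.ofList (pvNums ab.1)) num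
          then ((pvNums ab.2).count c : Int) else 0 := by
  simp only [chunkA]
  rw [List.filter_flatMap, List.map_flatMap, sum_flatMap_int]
  have hfun : (fun (p : Int) =>
        ((((pvNums ab.2).map (fun c => ((p, c), (1 : Int)))).filter
            (fun cv => cv.1 == (num, c))).map (fun cv => cv.2)).sum)
      = (fun p => if p = num then ((pvNums ab.2).count c : Int) else 0) := by
    funext p
    rw [List.filter_map,
      show ((fun (cv : (Int × Int) × Int) => cv.1 == (num, c)) ∘ (fun c' : Int => ((p, c'), (1 : Int)))) = (fun c' : Int => p == num && c' == c) from rfl]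
    by_cases h : p = num
    · have hb1 : ((p : Int) == num) = true := by simp [h]
      rw [if_pos h]
      rw [show (fun c' : Int => p == num && c' == c) = (fun c' : Int => c' == c) from by
        funext c'; rw [hb1, Bool.true_and]]
      rw [List.map_map,
        show ((fun (cv : (Int × Int) × Int) => cv.2) ∘ (fun c' : Int => ((p, c'), (1 : Int)))) = (fun _ : Int => (1 : Int)) from rfl]
      rw [List.map_const', List.sum_replicate, nsmul_eq_mul, mul_one, ← List.countP_eq_length_filter]
      rfl
    · have hb : ((p : Int) == num) = false := by simp [h]
      rw [if_neg h]
      rw [show (fun c' : Int => p == num && c' == c) = (fun _ : Int => false) from by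
        funext c'; rw [hb, Bool.false_and]]
      rw [List.filter_false]
      rfl
  rw [hfun]
  rw [sum_ite_single _ (PySem.Set.nodup_ofList _)]
  by_cases hm : num ∈ PySem.Set.ofList (pvNums ab.1)
  · rw [if_pos hm, if_pos ((PySem.Set.contains_iff _ _).mpr hm)]
  · rw [if_neg hm, if_neg (fun hc => hm ((PySem.Set.contains_iff _ _).mp hc))]

theorem counter_sum (C : List Int) (c : Int) :
    ((((PySem.Dict.counter C).items).filter (fun cv => cv.1 == c)).map (fun cv => cv.2)).sum
      = (C.count c : Int) := by
  rw [PySem.Dict.items_counter]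
  rw [sum_at_key (PySem.Set.ofList C) (fun k => (C.count k : Int)) (PySem.Set.nodup_ofList C) c]
  by_cases h : c ∈ C
  · rw [if_pos ((PySem.Set.mem_ofList _ _).mpr h)]
  · rw [if_neg (fun hm => h ((PySem.Set.mem_ofList _ _).mp hm)), List.count_eq_zero.mpr h]
    rfl

theorem KnS_eq (pairs : List (List (String × List Int) × List (String × List Int))) (num : Int) :
    KnS pairs num = PySem.Set.ofList (pairs.flatMap
      (fun ab => if PySem.Set.contains (PySem.Set.ofList (pvNums ab.1)) num then pvNums ab.2 else [])) := by
  unfold KnS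
  congr 1
  simp only [List.map_flatMap, List.filter_flatMap]
  congr 1
  funext ab
  exact chunk_keys ab num

theorem mem_KnS (pairs : List (List (String × List Int) × List (String × List Int))) (num c : Int) :
    c ∈ KnS pairs num ↔ ∃ ab ∈ pairs,
      PySem.Set.contains (PySem.Set.ofList (pvNums ab.1)) num = true ∧ c ∈ pvNums ab.2 := by
  rw [KnS_eq, PySem.Set.mem_ofList, List.mem_flatMap]
  constructor
  · rintro ⟨ab, hab, hc⟩
    by_cases hm : PySem.Set.contains (PySem.Set.ofList (pvNums ab.1)) num = true
    · exact ⟨ab, hab, hm, by rwa [if_pos hm] at hc⟩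
    · rw [if_neg hm] at hc; cases hc
  · rintro ⟨ab, hab, hm, hc⟩
    exact ⟨ab, hab, by rwa [if_pos hm]⟩

theorem nodup_KnS (pairs : List (List (String × List Int) × List (String × List Int))) (num : Int) :
    (KnS pairs num).Nodup := by
  simp only [KnS]
  exact PySem.Set.nodup_ofList _

theorem nodup_keys_TT (pairs : List (List (String × List Int) × List (String × List Int))) :
    (TT pairs).keys.Nodup := by
  apply nodup_keys_addW
  simp [PySem.Dict.keys_empty]

theorem keys_TT (pairs : List (List (String × List Int) × List (String × List Int))) :
    (TT pairs).keys = PySem.Set.ofList ((pairs.flatMap chunkA).map (fun q => q.1)) := by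
  simp only [TT]
  rw [keys_addW]
  simp [PySem.Dict.keys_empty, PySem.Set.update_nil_left]

theorem LAn_eq (pairs : List (List (String × List Int) × List (String × List Int))) (num : Int) :
    LAn num pairs = (KnS pairs num).map (fun c => (c, (TT pairs).getD (num, c) 0)) := by
  simp only [LAn]
  rw [PySem.Dict.items_eq_map_keys (TT pairs) (nodup_keys_TT pairs) 0]
  rw [keys_TT]
  rw [List.filter_map, List.map_map]
  have h1 : ((fun (pc : (Int × Int) × Int) => pc.1.1 == num) ∘ (fun k => (k, (TT pairs).getD k 0))) = (fun (k : Int × Int) => k.1 == num) := rfl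
  rw [h1]
  have h2 : ∀ k ∈ (PySem.Set.ofList ((pairs.flatMap chunkA).map (fun q => q.1))).filter (fun (k : Int × Int) => k.1 == num),
      ((fun (pc : (Int × Int) × Int) => (pc.1.2, pc.2)) ∘ (fun k => (k, (TT pairs).getD k 0))) k
        = ((fun c => (c, (TT pairs).getD (num, c) 0)) ∘ (fun (k : Int × Int) => k.2)) k := by
    intro k hk
    have hk1 : k.1 = num := eq_of_beq (List.mem_filter.mp hk).2
    show (k.2, (TT pairs).getD k 0) = (k.2, (TT pairs).getD (num, k.2) 0)
    rw [show ((num, k.2) : Int × Int) = k from Prod.ext hk1.symm rfl]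
  rw [List.map_congr_left h2, ← List.map_map]
  rw [ofList_filter_fst_map_snd _ num]
  rfl

theorem keyset_eq (pairs : List (List (String × List Int) × List (String × List Int))) (num : Int) :
    PySem.Set.ofList ((LAn num pairs).map (fun cv => cv.1))
      = PySem.Set.ofList ((LBn num pairs).map (fun cv => cv.1)) := by
  rw [LAn_eq, List.map_map]
  rw [show ((fun (cv : Int × Int) => cv.1) ∘ (fun c => (c, (TT pairs).getD (num, c) 0))) = (fun (c : Int) => c) from rfl]
  rw [List.map_id']
  have hid : PySem.Set.ofList (KnS pairs num) = KnS pairs num := by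
    simp only [KnS]
    exact PySem.Set.ofList_ofList _
  rw [hid, KnS_eq]
  simp only [LBn]
  rw [List.map_flatMap]
  have h3 : (fun ab => ((PySem.Dict.counter (pvNums ab.2)).items).map (fun (cv : Int × Int) => cv.1))
      = (fun (ab : List (String × List Int) × List (String × List Int)) => PySem.Set.ofList (pvNums ab.2)) := by
    funext ab
    rw [PySem.Dict.items_counter, List.map_map]
    rw [show ((fun (cv : Int × Int) => cv.1) ∘ (fun k => (k, ((pvNums ab.2).count k : Int)))) = (fun (c : Int) => c) from rfl]
    exact List.map_id' _
  rw [h3, flatMap_filter_ite]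
  apply set_ofList_congr_flatMap
  intro ab _
  by_cases hm : PySem.Set.contains (PySem.Set.ofList (pvNums ab.1)) num = true
  · rw [if_pos hm, if_pos hm, PySem.Set.ofList_ofList]
  · rw [if_neg hm, if_neg hm]

theorem sums_eq (pairs : List (List (String × List Int) × List (String × List Int))) (num c : Int) :
    (((LAn num pairs).filter (fun cv => cv.1 == c)).map (fun cv => cv.2)).sum
      = (((LBn num pairs).filter (fun cv => cv.1 == c)).map (fun cv => cv.2)).sum := by
  -- B side
  have hB : (((LBn num pairs).filter (fun cv => cv.1 == c)).map (fun cv => cv.2)).sum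
      = (pairs.map (fun ab => if PySem.Set.contains (PySem.Set.ofList (pvNums ab.1)) num
          then ((pvNums ab.2).count c : Int) else 0)).sum := by
    simp only [LBn]
    rw [List.filter_flatMap, List.map_flatMap, sum_flatMap_int]
    rw [show (fun ab => ((((PySem.Dict.counter (pvNums ab.2)).items).filter (fun cv => cv.1 == c)).map (fun cv => cv.2)).sum)
        = (fun (ab : List (String × List Int) × List (String × List Int)) => ((pvNums ab.2).count c : Int)) from funext (fun ab => counter_sum _ c)]
    rw [sum_filter_eq_sum_ite]
  -- A side
  have hT : (TT pairs).getD (num, c) 0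
      = (pairs.map (fun ab => if PySem.Set.contains (PySem.Set.ofList (pvNums ab.1)) num
          then ((pvNums ab.2).count c : Int) else 0)).sum := by
    rw [TT, getD_addW]
    rw [PySem.Dict.getD_empty]
    rw [List.filter_flatMap, List.map_flatMap, sum_flatMap_int]
    rw [show (fun ab => (((chunkA ab).filter (fun cv => cv.1 == (num, c))).map (fun cv => cv.2)).sum)
        = (fun (ab : List (String × List Int) × List (String × List Int)) => if PySem.Set.contains (PySem.Set.ofList (pvNums ab.1)) num then ((pvNums ab.2).count c : Int) else 0) from funext (fun ab => chunk_sum ab num c)]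
    simp
  rw [hB, LAn_eq, sum_at_key _ _ (nodup_KnS pairs num) c]
  by_cases hc : c ∈ KnS pairs num
  · rw [if_pos hc, hT]
  · rw [if_neg hc]
    symm
    apply List.sum_eq_zero
    intro x hx
    rcases List.mem_map.mp hx with ⟨ab, hab, rfl⟩
    by_cases hm : PySem.Set.contains (PySem.Set.ofList (pvNums ab.1)) num = true
    · rw [if_pos hm]
      have : c ∉ pvNums ab.2 := fun hcc => hc ((mem_KnS pairs num c).mpr ⟨ab, hab, hm, hcc⟩)
      rw [List.count_eq_zero.mpr this]
      rfl
    · rw [if_neg hm]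

theorem core_eq (pairs : List (List (String × List Int) × List (String × List Int)))
    (num : Int) (s : PySem.Dict Int Int) (hs : s.keys.Nodup) :
    addW s (LAn num pairs) = addW s (LBn num pairs) := by
  apply dict_ext_keys_getD _ _ (nodup_keys_addW _ _ hs) (nodup_keys_addW _ _ hs)
  · rw [keys_addW, keys_addW, ← set_update_ofList s.keys ((LAn num pairs).map (·.1)),
      ← set_update_ofList s.keys ((LBn num pairs).map (·.1))]
    rw [keyset_eq]
  · intro k
    rw [getD_addW, getD_addW, sums_eq]
theorem A_body_aux (num : Int) (L : List ((Int × Int) × Int)) (s : PySem.Dict Int Int) :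
    L.foldl (fun s pc => if pc.1.1 == num then s.modify pc.1.2 0 (· + pc.2) else s) s
      = addW s ((L.filter (fun pc => pc.1.1 == num)).map (fun pc => (pc.1.2, pc.2))) := by
  induction L generalizing s with
  | nil => rfl
  | cons pc t ih =>
      rw [List.foldl_cons, List.filter_cons]
      by_cases h : (pc.1.1 == num) = true
      · rw [if_pos h, if_pos h, List.map_cons, ih]
        rfl
      · rw [if_neg h, if_neg h, ih]

theorem A_body_eq (pairs : List (List (String × List Int) × List (String × List Int)))
    (num : Int) (s : PySem.Dict Int Int) :
    (TT pairs).items.foldl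
        (fun s pc => if pc.1.1 == num then s.modify pc.1.2 0 (· + pc.2) else s) s
      = addW s (LAn num pairs) := by
  rw [A_body_aux]
  rfl

theorem B_body_eq (pairs : List (List (String × List Int) × List (String × List Int)))
    (num : Int) (s : PySem.Dict Int Int) :
    ((pairs.map (fun ab => (PySem.Set.ofList (pvNums ab.1), PySem.Dict.counter (pvNums ab.2)))).foldl
        (fun s st => if PySem.Set.contains st.1 num then
            st.2.items.foldl (fun s cv => s.modify cv.1 0 (· + cv.2)) s else s) s)
      = addW s (LBn num pairs) := by
  induction pairs generalizing s with
  | nil => rfl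
  | cons ab t ih =>
      rw [List.map_cons, List.foldl_cons]
      simp only [LBn, List.filter_cons]
      by_cases h : (PySem.Set.contains (PySem.Set.ofList (pvNums ab.1)) num) = true
      · rw [if_pos h, if_pos h, List.flatMap_cons, addW_append, ih]
        rfl
      · rw [if_neg h, if_neg h, ih]
        rfl

theorem foldl_nodup_congr (last : List Int)
    (fA fB : PySem.Dict Int Int → Int → PySem.Dict Int Int)
    (h : ∀ s num, s.keys.Nodup → fA s num = fB s num)
    (hpres : ∀ s num, s.keys.Nodup → (fB s num).keys.Nodup) :
    ∀ (s : PySem.Dict Int Int), s.keys.Nodup → last.foldl fA s = last.foldl fB s := by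
  induction last with
  | nil => intro s _; rfl
  | cons x t ih =>
      intro s hs
      rw [List.foldl_cons, List.foldl_cons, h s x hs]
      exact ih _ (hpres s x hs)

theorem scores_eq (R : List (List (String × List Int))) (last : List Int) :
    last.foldl (fun s num =>
        ((PySem.List.pyRange 0 ((R.length : Int) - 1) 1).foldl
            (fun t i =>
              (PySem.Set.ofList (pvNums (PySem.List.pyGetD R i []))).foldl
                (fun t p => (pvNums (PySem.List.pyGetD R (i + 1) [])).foldl
                  (fun t c => t.modify (p, c) 0 (· + 1)) t) t)
            PySem.Dict.empty).items.foldl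
          (fun s pc => if pc.1.1 == num then s.modify pc.1.2 0 (· + pc.2) else s) s)
      PySem.Dict.empty
    = last.foldl (fun s num =>
        ((R.zip (PySem.List.slice R (some 1) none)).map
            (fun ab => (PySem.Set.ofList (pvNums ab.1), PySem.Dict.counter (pvNums ab.2)))).foldl
          (fun s st => if PySem.Set.contains st.1 num then
              st.2.items.foldl (fun s cv => s.modify cv.1 0 (· + cv.2)) s else s) s)
      PySem.Dict.empty := by
  rw [TA_eq R]
  rw [show PySem.List.slice R (some 1) none = R.tail by simp [pysem]]
  apply foldl_nodup_congr last _ _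
    (fun s num hs => (A_body_eq (R.zip R.tail) num s).trans
      ((core_eq (R.zip R.tail) num s hs).trans (B_body_eq (R.zip R.tail) num s).symm))
    (fun s num hs => by rw [B_body_eq]; exact nodup_keys_addW _ _ hs)
  simp [PySem.Dict.keys_empty]

theorem freq_eq (R : List (List (String × List Int))) :
    R.foldl (fun f d => (pvNums d).foldl (fun f n => f.modify n 0 (· + 1)) f) PySem.Dict.empty
      = PySem.Dict.counter (R.flatMap pvNums) := by
  rw [PySem.Dict.counter_eq_foldl]
  suffices h : ∀ d0 : PySem.Dict Int Int,
      R.foldl (fun f d => (pvNums d).foldl (fun f n => f.modify n 0 (· + 1)) f) d0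
        = (R.flatMap pvNums).foldl (fun d x => d.modify x 0 (· + 1)) d0 from h _
  induction R with
  | nil => intro d0; rfl
  | cons d t ih =>
      intro d0
      rw [List.foldl_cons, List.flatMap_cons, List.foldl_append, ih]

theorem nodup_sorted_counter_keys (R : List (List (String × List Int))) :
    ((PySem.List.sorted (PySem.Dict.counter (R.flatMap pvNums)).items (fun p => p.2) true).map
        (fun p => p.1)).Nodup := by
  have hperm := (PySem.List.sorted_perm (PySem.Dict.counter (R.flatMap pvNums)).items
    (fun (p : Int × Int) => p.2) true).map (fun p => p.1)
  rw [List.Perm.nodup_iff hperm]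
  exact PySem.Dict.nodup_keys_counter _

theorem main_eq (history : List (List (String × List Int))) :
    method_markov_w30 history = method_markov_w30_alt history := by
  simp only [method_markov_w30, method_markov_w30_alt]
  rw [scores_eq (PySem.List.slice history (some (-30)) none)
    (pvNums (PySem.List.pyGetD (PySem.List.slice history (some (-30)) none) (-1) []))]
  rw [freq_eq]
  rw [fill_eq _ _ (nodup_sorted_counter_keys (PySem.List.slice history (some (-30)) none))]

-- ===== VERDICT (by name: the statement is the Claim_ definition above) =====
theorem method_markov_w30_spec : Claim_equal_method_markov_w30 := by
  intro history _ _
  unfold Spec_method_markov_w30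
  exact main_eq history
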